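-- pv_equiv track=rewrite | github.com/bobvasic/vectorizationFourStages | backend_processor/advanced_vectorizer.py | _fit_bezier_curves
-- ===== SOURCE A (Python) =====
-- def _fit_bezier_curves(points):
--     """Fit Bezier curves to points"""
--     if len(points) < 3:
--         return points
--
--     # Simplified Bezier fitting
--     bezier_points = []
--     for i in range(0, len(points) - 2, 3):
--         p0 = points[i]
--         p1 = points[min(i+1, len(points)-1)]
--         p2 = points[min(i+2, len(points)-1)]
--         bezier_points.append((p0, p1, p2))
--
--     return bezier_points
-- ===== SOURCE B (Python) =====
-- def _fit_bezier_curves(points):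
--     """Fit Bezier curves to points"""
--     if len(points) < 3:
--         return points
--     return list(zip(points[0::3], points[1::3], points[2::3]))
-- ===== Notes on version B (the rewrite author's own statement) =====
-- stated objective: idiomatic
-- what changed: The explicit index loop with dead min(...) clamps is replaced by zipping the three strided slices points[0::3], points[1::3], points[2::3]; zip's stop-at-shortest drops the incomplete trailing group exactly as the loop's range bound does.
-- outside the precondition, e.g. on _fit_bezier_curves([(1, 1)]): A returns [(1, 1)], B returns [(1, 1)]; on _fit_bezier_curves([(1, 1), (2, 2)]): A returns [(1, 1), (2, 2)], B returns [(1, 1), (2, 2)]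
import Mathlib
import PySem

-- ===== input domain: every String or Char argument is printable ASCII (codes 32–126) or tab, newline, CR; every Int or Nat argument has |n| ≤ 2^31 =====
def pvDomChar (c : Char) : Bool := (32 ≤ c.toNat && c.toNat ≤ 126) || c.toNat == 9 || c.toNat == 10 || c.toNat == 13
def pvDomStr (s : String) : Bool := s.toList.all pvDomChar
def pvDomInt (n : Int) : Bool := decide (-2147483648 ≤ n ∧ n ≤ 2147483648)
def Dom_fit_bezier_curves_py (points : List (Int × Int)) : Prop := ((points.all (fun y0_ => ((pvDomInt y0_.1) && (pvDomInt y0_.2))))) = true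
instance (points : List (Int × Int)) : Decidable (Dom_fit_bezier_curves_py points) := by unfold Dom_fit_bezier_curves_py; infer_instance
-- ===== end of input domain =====

-- B replaces the index loop by zipping the three strided slices points[0::3], points[1::3], points[2::3] (idiomatic; same output).

-- ===== PORT A =====
def fit_bezier_curves_py (points : List (Int × Int)) : List ((Int × Int) × (Int × Int) × (Int × Int)) :=
  -- Python's `return points` branch (len < 3) yields a value of the declared return type
  -- only when points = []; lengths 1 and 2 are excluded by Pre_.
  if points.length < 3 then []
  else
    (PySem.List.pyRange 0 ((points.length : Int) - 2) 3).foldl (fun acc i =>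
      let p0 := PySem.List.pyGetD points i ((0 : Int), (0 : Int))
      let p1 := PySem.List.pyGetD points (min (i + 1) ((points.length : Int) - 1)) ((0 : Int), (0 : Int))
      let p2 := PySem.List.pyGetD points (min (i + 2) ((points.length : Int) - 1)) ((0 : Int), (0 : Int))
      acc ++ [(p0, p1, p2)]) []

-- ===== PORT B =====
def fit_bezier_curves_py_alt (points : List (Int × Int)) : List ((Int × Int) × (Int × Int) × (Int × Int)) :=
  -- same guard as Source B; `return points` typed as [] exactly as in port A (Pre_ excludes lengths 1, 2)
  if points.length < 3 then []
  else
    let s0 := (PySem.List.slice? points (some 0) none 3).getD []   -- step 3 ≠ 0: never none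
    let s1 := (PySem.List.slice? points (some 1) none 3).getD []
    let s2 := (PySem.List.slice? points (some 2) none 3).getD []
    s0.zip (s1.zip s2)

-- ===== PRECONDITION & SPEC =====
-- Pre_ excludes lists of length 1 or 2: there Python A returns `points` itself — a list of
-- 2-tuples, not a value of the declared triple-list return type.
def Pre_fit_bezier_curves_py (points : List (Int × Int)) : Prop :=
  points.length ≠ 1 ∧ points.length ≠ 2
instance (points : List (Int × Int)) : Decidable (Pre_fit_bezier_curves_py points) := by
  unfold Pre_fit_bezier_curves_py; infer_instance

def pvWitness_fit_bezier_curves_py : (List (Int × Int)) := [(0, 0), (1, 1), (2, 2), (3, 3)]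

def Spec_fit_bezier_curves_py (points : List (Int × Int)) (out : List ((Int × Int) × (Int × Int) × (Int × Int))) : Prop := out = fit_bezier_curves_py_alt points
instance (points : List (Int × Int)) (out : List ((Int × Int) × (Int × Int) × (Int × Int))) : Decidable (Spec_fit_bezier_curves_py points out) := by unfold Spec_fit_bezier_curves_py; infer_instance

-- ===== CLAIM (what is proved, stated in full; the proofs are below) =====
def Claim_equal_fit_bezier_curves_py : Prop := ∀ (points : List (Int × Int)), Dom_fit_bezier_curves_py points → Pre_fit_bezier_curves_py points → Spec_fit_bezier_curves_py points (fit_bezier_curves_py points)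

-- ===== LEMMAS AND PROOFS =====

-- a strided slice xs[j::3] as a map over an index range (any default d: all indices are in range)
lemma slice3_eq_map {α : Type} (xs : List α) (d : α) (j : Nat) (hj : j ≤ xs.length) :
    (PySem.List.slice? xs (some (j : Int)) none 3).getD [] =
      (List.range (((xs.length : Int) - j + 2) / 3).toNat).map (fun k => xs.getD (j + 3 * k) d) := by
  simp only [PySem.List.slice?, PySem.List.sliceIndices]
  norm_num
  simp only [if_neg (show ¬((j:Int) < 0) from by omega),
             min_eq_left (show (j:Int) ≤ (xs.length:Int) from by omega)]
  have hc : (if (j : Int) < (xs.length : Int) then (((xs.length : Int) - j + 3 - 1) / 3).toNat else 0)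
      = (((xs.length : Int) - j + 2) / 3).toNat := by split_ifs <;> omega
  rw [hc]
  have hg : ∀ k ∈ List.range (((xs.length : Int) - j + 2) / 3).toNat,
      xs[((j : Int) + 3 * (k : Int)).toNat]? = some (xs[j + 3 * k]?.getD d) := by
    intro k hk
    simp only [List.mem_range] at hk
    have hlt : j + 3 * k < xs.length := by omega
    have e : ((j : Int) + 3 * (k : Int)).toNat = j + 3 * k := by omega
    rw [e]
    simp [List.getElem?_eq_getElem hlt]
  rw [List.filterMap_congr hg]
  simp

-- port A's loop as a map over an index range
lemma portA_eq_map (xs : List (Int × Int)) (h : 3 ≤ xs.length) :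
    fit_bezier_curves_py xs =
      (List.range (((xs.length : Int) - 2 + 2) / 3).toNat).map
        (fun k => (xs.getD (3 * k) (0, 0), xs.getD (3 * k + 1) (0, 0), xs.getD (3 * k + 2) (0, 0))) := by
  unfold fit_bezier_curves_py
  rw [if_neg (by omega)]
  show (PySem.List.pyRange 0 ((xs.length : Int) - 2) 3).foldl (fun acc i => acc ++
      [(PySem.List.pyGetD xs i ((0:Int),(0:Int)),
        PySem.List.pyGetD xs (min (i + 1) ((xs.length : Int) - 1)) ((0:Int),(0:Int)),
        PySem.List.pyGetD xs (min (i + 2) ((xs.length : Int) - 1)) ((0:Int),(0:Int)))]) [] = _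
  rw [PySem.List.foldl_append_singleton_eq_map, List.nil_append]
  rw [PySem.List.pyRange_of_pos 0 ((xs.length : Int) - 2) (by norm_num)]
  rw [if_pos (by omega), List.map_map]
  have hc : (((xs.length : Int) - 2 - 0 + 3 - 1) / 3).toNat = (((xs.length : Int) - 2 + 2) / 3).toNat := by omega
  rw [hc]
  apply List.map_congr_left
  intro k hk
  simp only [List.mem_range] at hk
  have h0 : (0 : Int) + 3 * (k : Int) = ((3 * k : Nat) : Int) := by push_cast; ring
  have h1 : ((3 * k : Nat) : Int) + 1 = ((3 * k + 1 : Nat) : Int) := by push_cast; ring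
  have h2 : ((3 * k : Nat) : Int) + 2 = ((3 * k + 2 : Nat) : Int) := by push_cast; ring
  have m1 : min (((3 * k + 1 : Nat)) : Int) ((xs.length : Int) - 1) = ((3 * k + 1 : Nat) : Int) := by omega
  have m2 : min (((3 * k + 2 : Nat)) : Int) ((xs.length : Int) - 1) = ((3 * k + 2 : Nat) : Int) := by omega
  simp only [Function.comp, h0, h1, h2, m1, m2, PySem.List.pyGetD_natCast]

-- ===== VERDICT (by name: the statement is the Claim_ definition above) =====
theorem fit_bezier_curves_py_spec : Claim_equal_fit_bezier_curves_py := by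
  intro points _ hpre
  unfold Spec_fit_bezier_curves_py fit_bezier_curves_py_alt
  by_cases h3 : points.length < 3
  · interval_cases hl : points.length
    all_goals simp_all [fit_bezier_curves_py, Pre_fit_bezier_curves_py]
  · rw [if_neg (by omega)]
    have h0 := slice3_eq_map points ((0:Int),(0:Int)) 0 (by omega)
    have h1 := slice3_eq_map points ((0:Int),(0:Int)) 1 (by omega)
    have h2 := slice3_eq_map points ((0:Int),(0:Int)) 2 (by omega)
    norm_num at h0 h1 h2
    rw [portA_eq_map points (by omega)]
    show _ = ((PySem.List.slice? points (some 0) none 3).getD []).zip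
      (((PySem.List.slice? points (some 1) none 3).getD []).zip
       ((PySem.List.slice? points (some 2) none 3).getD []))
    rw [h0, h1, h2]
    apply List.ext_getElem
    · simp only [List.length_map, List.length_range, List.length_zip]; omega
    · intro k hk1 hk2
      simp only [List.length_map, List.length_range, List.length_zip] at hk1 hk2
      simp only [List.getElem_zip, List.getElem_map, List.getElem_range,
                 List.getD_eq_getElem?_getD]
      rw [show 1 + 3 * k = 3 * k + 1 from by omega, show 2 + 3 * k = 3 * k + 2 from by omega]
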